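-- pv_equiv track=rewrite | github.com/LuisAMS/PruebasNLP | frecuenciaPalabras.py | creaDiccionario
-- ===== SOURCE A (Python) =====
-- def creaDiccionario (lista):
--     listaPalabras = sorted (set (lista))
--     diccionario = {}
--     for x in range (0, len(listaPalabras)):
--         diccionario [listaPalabras[x]] = 0
--     for palabra in diccionario:
--         for y in range (0, len(lista)):
--             if palabra == lista [y]:
--                 diccionario [palabra] += 1
--     return diccionario
-- ===== SOURCE B (Python) =====
-- def creaDiccionario (lista):
--     # One pass over sorted(lista): group equal runs; keys land in sorted order.
--     s = sorted(lista)
--     diccionario = {}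
--     if not s:
--         return diccionario
--     cur = s[0]
--     cnt = 0
--     for w in s:
--         if w == cur:
--             cnt += 1
--         else:
--             diccionario[cur] = cnt
--             cur = w
--             cnt = 1
--     diccionario[cur] = cnt
--     return diccionario
-- ===== Notes on version B (the rewrite author's own statement) =====
-- stated objective: faster
-- what changed: Replaced the per-distinct-word rescan of the whole list (dict of zeros, then for each key a full pass counting matches) by a single sort of the list followed by one linear run-length grouping pass that emits each (word, count) directly in sorted order.
import Mathlib
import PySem

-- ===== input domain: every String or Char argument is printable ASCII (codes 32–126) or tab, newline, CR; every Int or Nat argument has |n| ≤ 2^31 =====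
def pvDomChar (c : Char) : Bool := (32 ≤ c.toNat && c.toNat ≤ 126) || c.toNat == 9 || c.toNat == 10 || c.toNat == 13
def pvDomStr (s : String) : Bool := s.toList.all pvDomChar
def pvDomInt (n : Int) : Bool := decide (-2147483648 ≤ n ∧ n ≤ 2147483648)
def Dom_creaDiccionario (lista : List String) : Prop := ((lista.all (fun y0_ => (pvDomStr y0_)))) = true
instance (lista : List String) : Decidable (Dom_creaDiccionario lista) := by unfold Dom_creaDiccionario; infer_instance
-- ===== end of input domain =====

-- B replaces A's per-key rescans of the list by sort-then-group-runs (one linear pass after sorting).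

-- ===== PORT A =====
-- first loop of A: diccionario[listaPalabras[x]] = 0 for x in range(0, len(listaPalabras))
def creaZeros (listaPalabras : List String) : PySem.Dict String Int :=
  (PySem.List.pyRange 0 (PySem.List.len listaPalabras) 1).foldl
    (fun d x => d.insert (PySem.List.pyGetD listaPalabras x "") 0) PySem.Dict.empty

-- second loop of A: for palabra in diccionario: for y in range(0, len(lista)): …
def creaCounts (lista : List String) (diccionario : PySem.Dict String Int) : PySem.Dict String Int :=
  diccionario.keys.foldl
    (fun d palabra =>
      (PySem.List.pyRange 0 (PySem.List.len lista) 1).foldl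
        (fun d y =>
          if palabra == PySem.List.pyGetD lista y "" then
            d.insert palabra (d.getD palabra 0 + 1)
          else d)
        d)
    diccionario

def creaDiccionario (lista : List String) : List (String × Int) :=
  (creaCounts lista (creaZeros (PySem.List.sorted (PySem.Set.ofList lista) (fun x => x) false))).items

-- ===== PORT B =====
-- the run-grouping loop of Source B: current value, running count
def creaRun : List String → String → Int → List (String × Int)
  | [], cur, cnt => [(cur, cnt)]
  | w :: rest, cur, cnt =>
      if w == cur then creaRun rest cur (cnt + 1)
      else (cur, cnt) :: creaRun rest w 1

def creaDiccionario_alt (lista : List String) : List (String × Int) :=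
  match PySem.List.sorted lista (fun x => x) false with
  | [] => []
  | h :: t => creaRun (h :: t) h 0

-- ===== PRECONDITION & SPEC =====
def Spec_creaDiccionario (lista : List String) (out : List (String × Int)) : Prop := out = creaDiccionario_alt lista
instance (lista : List String) (out : List (String × Int)) : Decidable (Spec_creaDiccionario lista out) := by unfold Spec_creaDiccionario; infer_instance

-- ===== CLAIM (what is proved, stated in full; the proofs are below) =====
def Claim_equal_creaDiccionario : Prop := ∀ (lista : List String), Dom_creaDiccionario lista → Spec_creaDiccionario lista (creaDiccionario lista)

-- ===== LEMMAS AND PROOFS =====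

-- the canonical normal form both ports are reduced to
def pvNorm (lista : List String) : List (String × Int) :=
  (PySem.List.sorted (PySem.Set.ofList lista) (fun x => x) false).map
    (fun k => (k, (lista.count k : Int)))

-- the inner counting loop of A, after removing the index indirection
def pvInner (l : List String) (p : String) (d : PySem.Dict String Int) : PySem.Dict String Int :=
  l.foldl (fun d w => if p == w then d.insert p (d.getD p 0 + 1) else d) d

theorem pvInner_getD (p : String) : ∀ (l : List String) (d : PySem.Dict String Int) (q : String),
    (pvInner l p d).getD q 0 = if q = p then d.getD p 0 + (l.count p : Int) else d.getD q 0 := by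
  intro l
  induction l with
  | nil =>
    intro d q
    by_cases hq : q = p
    · subst hq; simp [pvInner]
    · simp [pvInner, hq]
  | cons w rest ih =>
    intro d q
    show (pvInner rest p (if p == w then d.insert p (d.getD p 0 + 1) else d)).getD q 0 = _
    by_cases hw : p = w
    · subst hw
      simp only [beq_self_eq_true, if_true]
      rw [ih]
      by_cases hq : q = p
      · subst hq
        simp
        ring
      · simp [hq, PySem.Dict.getD_insert]
    · have hb : (p == w) = false := beq_eq_false_iff_ne.mpr hw
      simp only [hb, Bool.false_eq_true, if_false]
      rw [ih]
      have hc : List.count p (w :: rest) = List.count p rest := by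
        simp [List.count_cons]
        exact fun h => hw h.symm
      rw [hc]

theorem pvInner_keys (p : String) : ∀ (l : List String) (d : PySem.Dict String Int),
    p ∈ d.keys → (pvInner l p d).keys = d.keys := by
  intro l
  induction l with
  | nil => intro d _; rfl
  | cons w rest ih =>
    intro d hp
    show (pvInner rest p (if p == w then d.insert p (d.getD p 0 + 1) else d)).keys = _
    by_cases hw : (p == w) = true
    · simp only [hw, if_true]
      have hcont : d.contains p = true := (PySem.Dict.contains_iff_mem_keys _ _).mpr hp
      have hk : (d.insert p (d.getD p 0 + 1)).keys = d.keys :=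
        PySem.Dict.keys_insert_of_contains d (d.getD p 0 + 1) hcont
      rw [ih _ (by rw [hk]; exact hp), hk]
    · simp only [hw]
      exact ih d hp

theorem pvOuter_getD (l : List String) (q : String) : ∀ (ps : List String) (d : PySem.Dict String Int),
    (ps.foldl (fun d p => pvInner l p d) d).getD q 0
      = d.getD q 0 + (ps.count q : Int) * (l.count q : Int) := by
  intro ps
  induction ps with
  | nil => intro d; simp
  | cons p rest ih =>
    intro d
    show (rest.foldl (fun d p => pvInner l p d) (pvInner l p d)).getD q 0 = _
    rw [ih, pvInner_getD]
    by_cases hq : q = p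
    · subst hq
      rw [if_pos rfl]
      simp
      ring
    · rw [if_neg hq]
      have : List.count q (p :: rest) = List.count q rest := by
        simp [List.count_cons]
        exact fun h => hq h.symm
      rw [this]

theorem pvOuter_keys (l : List String) : ∀ (ps : List String) (d : PySem.Dict String Int),
    (∀ p ∈ ps, p ∈ d.keys) → (ps.foldl (fun d p => pvInner l p d) d).keys = d.keys := by
  intro ps
  induction ps with
  | nil => intro d _; rfl
  | cons p rest ih =>
    intro d hps
    show (rest.foldl (fun d p => pvInner l p d) (pvInner l p d)).keys = _
    have hk : (pvInner l p d).keys = d.keys := pvInner_keys p l d (hps p List.mem_cons_self)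
    rw [ih _ (by rw [hk]; exact fun x hx => hps x (List.mem_cons_of_mem p hx)), hk]

theorem portA_eq_norm (lista : List String) : creaDiccionario lista = pvNorm lista := by
  have hKlt : (PySem.List.sorted (PySem.Set.ofList lista) (fun x => x) false).Pairwise (· < ·) :=
    PySem.List.sorted_ofList_pairwise_lt lista
  set K := PySem.List.sorted (PySem.Set.ofList lista) (fun x => x) false with hKdef
  have hKnd : K.Nodup := hKlt.imp ne_of_lt
  have hz : creaZeros K = K.foldl (fun d k => d.insert k 0) PySem.Dict.empty := by
    unfold creaZeros
    exact PySem.List.foldl_pyRange_zero_pyGetD K ""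
      (fun (d : PySem.Dict String Int) k => d.insert k 0) PySem.Dict.empty
  have hitems0 : (creaZeros K).items = K.map (fun a => (a, (0 : Int))) := by
    rw [hz]
    have := PySem.Dict.items_foldl_insert_fresh (l := K) (k := fun a => a) (v := fun _ => (0 : Int))
      (d := PySem.Dict.empty) (by intro a _; simp) (by simpa using hKnd)
    simpa using this
  have hkeys0 : (creaZeros K).keys = K := by
    show (creaZeros K).items.map (·.1) = K
    rw [hitems0]
    have hco : ((fun x : String × Int => x.1) ∘ fun a : String => (a, (0 : Int))) = id := rfl
    rw [List.map_map, hco, List.map_id]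
  have hcc : creaCounts lista (creaZeros K)
      = (creaZeros K).keys.foldl (fun d palabra => pvInner lista palabra d) (creaZeros K) := by
    unfold creaCounts pvInner
    congr 1
    funext d palabra
    exact PySem.List.foldl_pyRange_zero_pyGetD lista ""
      (fun d w => if palabra == w then d.insert palabra (d.getD palabra 0 + 1) else d) d
  show (creaCounts lista (creaZeros K)).items = pvNorm lista
  rw [hcc]
  have hkeys1 : ((creaZeros K).keys.foldl (fun d palabra => pvInner lista palabra d) (creaZeros K)).keys = K := by
    rw [pvOuter_keys lista (creaZeros K).keys (creaZeros K) (fun p hp => hp), hkeys0]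
  have hnd1 : ((creaZeros K).keys.foldl (fun d palabra => pvInner lista palabra d) (creaZeros K)).keys.Nodup := by
    rw [hkeys1]; exact hKnd
  rw [PySem.Dict.items_eq_map_keys _ hnd1 0, hkeys1]
  unfold pvNorm
  rw [← hKdef]
  apply List.map_congr_left
  intro k hk
  have hgd1 : ((creaZeros K).keys.foldl (fun d palabra => pvInner lista palabra d) (creaZeros K)).getD k 0
      = (creaZeros K).getD k 0 + (List.count k (creaZeros K).keys : Int) * (List.count k lista : Int) :=
    pvOuter_getD lista k (creaZeros K).keys (creaZeros K)
  have hgd0 : (creaZeros K).getD k 0 = 0 := by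
    apply PySem.Dict.getD_of_mem_items (d := creaZeros K) (k := k) (v := 0)
    · rw [hitems0]
      exact List.mem_map.mpr ⟨k, hk, rfl⟩
    · rw [hkeys0]; exact hKnd
  have hcnt : List.count k (creaZeros K).keys = 1 := by
    rw [hkeys0]
    exact List.count_eq_one_of_mem hKnd hk
  rw [hgd1, hgd0, hcnt]
  simp

-- group a (sorted) list into runs
def pvGroup : List String → List (String × Int)
  | [] => []
  | h :: t => (h, 1 + ((t.takeWhile (fun w => w == h)).length : Int)) :: pvGroup (t.dropWhile (fun w => w == h))
  termination_by l => l.length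
  decreasing_by exact Nat.lt_succ_of_le (List.dropWhile_sublist _).length_le

theorem creaRun_eq_group (s : List String) : ∀ (cur : String) (cnt : Int),
    creaRun s cur cnt =
      (cur, cnt + ((s.takeWhile (fun w => w == cur)).length : Int)) ::
        pvGroup (s.dropWhile (fun w => w == cur)) := by
  induction s with
  | nil => intro cur cnt; simp [creaRun, pvGroup]
  | cons w rest ih =>
    intro cur cnt
    by_cases hw : w = cur
    · subst hw
      simp only [creaRun, beq_self_eq_true, if_true, List.takeWhile_cons, List.dropWhile_cons]
      rw [ih]
      simp; ring
    · have hb : (w == cur) = false := beq_eq_false_iff_ne.mpr hw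
      simp only [creaRun, hb, List.takeWhile_cons, List.dropWhile_cons]
      simp only [Bool.false_eq_true, if_false, List.length_nil]
      rw [ih]
      rw [pvGroup]
      simp

theorem group_sorted_eq_norm (s : List String) (hs : s.Pairwise (· ≤ ·)) :
    pvGroup s =
      (PySem.List.sorted (PySem.Set.ofList s) (fun x => x) false).map
        (fun k => (k, (s.count k : Int))) := by
  induction s using pvGroup.induct with
  | case1 => simp [pvGroup, PySem.Set.ofList, PySem.List.sorted_eq_nil_iff]
  | case2 h t ih =>
    have hle : ∀ x ∈ t, h ≤ x := (List.pairwise_cons.mp hs).1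
    have htp : t.Pairwise (· ≤ ·) := (List.pairwise_cons.mp hs).2
    set t1 := t.takeWhile (fun w => w == h) with ht1def
    set t2 := t.dropWhile (fun w => w == h) with ht2def
    have hsplit : t1 ++ t2 = t := List.takeWhile_append_dropWhile
    have ht1 : ∀ x ∈ t1, x = h := by
      intro x hx
      rw [ht1def] at hx
      have hb : (fun w => w == h) x = true := List.mem_takeWhile_imp (p := fun w => w == h) (l := t) hx
      exact eq_of_beq (by simpa using hb)
    have ht2p : t2.Pairwise (· ≤ ·) := htp.sublist (List.dropWhile_sublist _)
    have ht2h : ∀ x ∈ t2, h < x := by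
      cases heq : t2 with
      | nil => simp
      | cons w r =>
        have heq' : List.dropWhile (fun w => w == h) t = w :: r := by rw [← ht2def]; exact heq
        have hwh : (w == h) = false := by
          have hne : List.dropWhile (fun w => w == h) t ≠ [] := by simp [heq']
          have h2 := List.head_dropWhile_not (fun w => w == h) hne
          simp only [heq', List.head_cons] at h2
          exact h2
        have hwne : w ≠ h := by simpa using hwh
        have hwmem : w ∈ t := by
          have hw2 : w ∈ t2 := by rw [heq]; exact List.mem_cons_self
          rw [ht2def] at hw2
          exact (List.dropWhile_sublist _).mem hw2
        have hhw : h < w := lt_of_le_of_ne (hle w hwmem) (Ne.symm hwne)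
        have ht2p' : (w :: r).Pairwise (· ≤ ·) := heq ▸ ht2p
        intro x hx
        rcases List.mem_cons.mp hx with rfl | hxr
        · exact hhw
        · exact lt_of_lt_of_le hhw ((List.pairwise_cons.mp ht2p').1 x hxr)
    have ht2nh : h ∉ t2 := fun hmem => lt_irrefl h (ht2h h hmem)
    have hcount_h : (h :: t).count h = 1 + t1.length := by
      rw [← hsplit]
      rw [List.count_cons_self, List.count_append]
      have h1 : t1.count h = t1.length := List.count_eq_length.mpr (fun b hb => ((ht1 b hb).symm : h = b))
      have h2 : t2.count h = 0 := List.count_eq_zero.mpr ht2nh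
      omega
    have hsorted : PySem.List.sorted (PySem.Set.ofList (h :: t)) (fun x => x) false
        = h :: PySem.List.sorted (PySem.Set.ofList t2) (fun x => x) false := by
      apply PySem.List.sorted_eq_of_perm_of_pairwise_lt
      · have hperm0 : (PySem.List.sorted (PySem.Set.ofList t2) (fun x => x) false).Perm (PySem.Set.ofList t2) :=
          PySem.List.sorted_perm _ _ _
        have hnodup1 : (h :: PySem.Set.ofList t2).Nodup := by
          refine List.nodup_cons.mpr ⟨fun hmem => ?_, PySem.Set.nodup_ofList _⟩
          exact ht2nh ((PySem.Set.mem_ofList _ _).mp hmem)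
        have hperm1 : (h :: PySem.Set.ofList t2).Perm (PySem.Set.ofList (h :: t)) := by
          rw [List.perm_ext_iff_of_nodup hnodup1 (PySem.Set.nodup_ofList _)]
          intro x
          simp only [List.mem_cons, PySem.Set.mem_ofList]
          constructor
          · rintro (rfl | hx)
            · exact Or.inl rfl
            · exact Or.inr (hsplit ▸ List.mem_append_right t1 hx)
          · rintro (rfl | hx)
            · exact Or.inl rfl
            · rw [← hsplit] at hx
              rcases List.mem_append.mp hx with h1 | h2
              · exact Or.inl (ht1 x h1)
              · exact Or.inr h2
        exact (hperm0.cons h).trans hperm1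
      · refine List.pairwise_cons.mpr ⟨?_, ?_⟩
        · intro y hy
          exact ht2h y ((PySem.Set.mem_ofList _ _).mp ((PySem.List.mem_sorted _ _ _ _).mp hy))
        · exact PySem.List.sorted_ofList_pairwise_lt _
    rw [hsorted, pvGroup]
    rw [← ht1def, ← ht2def]
    have hmapc : (PySem.List.sorted (PySem.Set.ofList t2) (fun x => x) false).map
          (fun k => (k, ((h :: t).count k : Int)))
        = (PySem.List.sorted (PySem.Set.ofList t2) (fun x => x) false).map
          (fun k => (k, (t2.count k : Int))) := by
      apply List.map_congr_left
      intro k hk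
      have hkt2 : k ∈ t2 := (PySem.Set.mem_ofList _ _).mp ((PySem.List.mem_sorted _ _ _ _).mp hk)
      have hkh : h < k := ht2h k hkt2
      have hkne : k ≠ h := ne_of_gt hkh
      have hknt1 : k ∉ t1 := fun hmem => hkne (ht1 k hmem)
      have : (h :: t).count k = t2.count k := by
        rw [← hsplit, List.count_cons_of_ne hkne.symm, List.count_append,
          List.count_eq_zero.mpr hknt1]
        omega
      rw [this]
    rw [List.map_cons, hmapc, ih ht2p]
    rw [hcount_h]
    push_cast
    ring_nf

theorem portB_eq_norm (lista : List String) : creaDiccionario_alt lista = pvNorm lista := by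
  have hp : (PySem.List.sorted lista (fun x => x) false).Pairwise (· ≤ ·) :=
    PySem.List.sorted_pairwise _ _
  have hnormeq : pvNorm (PySem.List.sorted lista (fun x => x) false) = pvNorm lista := by
    unfold pvNorm
    have hperm : (PySem.Set.ofList (PySem.List.sorted lista (fun x => x) false)).Perm
        (PySem.Set.ofList lista) := by
      rw [List.perm_ext_iff_of_nodup (PySem.Set.nodup_ofList _) (PySem.Set.nodup_ofList _)]
      intro x
      simp [PySem.Set.mem_ofList, PySem.List.mem_sorted]
    rw [PySem.List.sorted_eq_sorted_of_perm _ _ _ (fun a b h => h) hperm]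
    apply List.map_congr_left
    intro k _
    rw [((PySem.List.sorted_perm lista (fun x => x) false)).count_eq]
  unfold creaDiccionario_alt
  cases hsv : PySem.List.sorted lista (fun x => x) false with
  | nil =>
    have hl : lista = [] := (PySem.List.sorted_eq_nil_iff _ _ _).mp hsv
    subst hl
    show ([] : List (String × Int)) = pvNorm []
    simp [pvNorm, PySem.Set.ofList, PySem.List.sorted_eq_nil_iff]
  | cons h t =>
    show creaRun (h :: t) h 0 = pvNorm lista
    have hgr : creaRun (h :: t) h 0 = pvGroup (h :: t) := by
      rw [creaRun_eq_group]
      rw [pvGroup]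
      simp
      omega
    rw [hgr]
    rw [hsv] at hp hnormeq
    rw [group_sorted_eq_norm _ hp]
    exact hnormeq

-- ===== VERDICT (by name: the statement is the Claim_ definition above) =====
theorem creaDiccionario_spec : Claim_equal_creaDiccionario := by
  intro lista _
  unfold Spec_creaDiccionario
  rw [portA_eq_norm, portB_eq_norm]
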